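-- pv_equiv track=rewrite | github.com/abelcarreras/VQEmulti | vqemulti/utils.py | fock_to_bk
-- ===== SOURCE A (Python) =====
-- def should_include_in_parity(qubit_idx, fermion_idx):
--     """
--     Determine if fermion_idx should be included in the parity calculation for qubit_idx.
--     This implements the Fenwick tree structure for BK transformation.
--     """
--     # Convert to 1-indexed for easier bit manipulation
--     i = qubit_idx + 1
--     j = fermion_idx + 1
--
--     # Check if j is in the "update set" of i in Fenwick tree
--     # This happens when j is in the subtree rooted at i
--
--     # First check: j must be <= i
--     if j > i:
--         return False
--
--     # Get the binary representations
--     # For BK transformation, we need to check if j is in the Fenwick update set of i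
--
--     # Find the rightmost set bit of i (this determines the range)
--     rightmost_bit = i & (-i)  # LSB operation
--
--     # j is included if it's in the range [i - rightmost_bit + 1, i]
--     return (i - rightmost_bit + 1) <= j <= i
--
-- def fock_to_bk(fock_vector):
--     """
--     Convert Fock state vector to Bravyi-Kitaev encoded vector.
--
--     The BK transformation uses a Fenwick tree structure where:
--     - Some qubits store occupation numbers directly
--     - Others store parities of specific subsets determined by binary tree structure
--
--     :param fock_vector: List of occupation numbers (0 or 1)
--     :return: List representing BK encoded state
--     """
--     n = len(fock_vector)
--     bk_vector = [0] * n
--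
--     for i in range(n):
--         # Calculate the parity for qubit i
--         parity = 0
--
--         # Get the set of fermionic modes that contribute to qubit i
--         # This follows the Fenwick tree structure
--         for j in range(n):
--             if should_include_in_parity(i, j):
--                 parity ^= fock_vector[j]
--
--         bk_vector[i] = parity
--
--     return bk_vector
-- ===== SOURCE B (Python) =====
-- def fock_to_bk(fock_vector):
--     # Prefix-XOR array: prefix[k] = fock[0] ^ ... ^ fock[k-1]; each BK qubit i is
--     # the XOR of the contiguous Fenwick range [(i+1) - lsb(i+1), i], read off in O(1).
--     prefix = [0]
--     acc = 0
--     for x in fock_vector: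
--         acc ^= x
--         prefix.append(acc)
--     return [prefix[i + 1] ^ prefix[(i + 1) - ((i + 1) & -(i + 1))]
--             for i in range(len(fock_vector))]
-- ===== Notes on version B (the rewrite author's own statement) =====
-- stated objective: faster
-- what changed: Replaces the O(n^2) double loop (membership test of every fermion index against every qubit's Fenwick update set) by a single prefix-XOR pass, reading each qubit's contiguous range parity as prefix[i+1] ^ prefix[(i+1)-lsb(i+1)] in O(1).
import Mathlib
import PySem

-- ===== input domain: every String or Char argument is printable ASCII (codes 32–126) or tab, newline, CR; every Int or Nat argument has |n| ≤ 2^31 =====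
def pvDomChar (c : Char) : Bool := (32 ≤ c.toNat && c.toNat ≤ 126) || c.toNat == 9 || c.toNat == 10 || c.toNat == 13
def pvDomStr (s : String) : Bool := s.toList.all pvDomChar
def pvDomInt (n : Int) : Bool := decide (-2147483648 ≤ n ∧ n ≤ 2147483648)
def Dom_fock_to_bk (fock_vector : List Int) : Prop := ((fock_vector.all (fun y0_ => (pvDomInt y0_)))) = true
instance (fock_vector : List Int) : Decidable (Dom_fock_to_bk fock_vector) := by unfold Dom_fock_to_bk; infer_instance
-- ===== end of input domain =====

-- B replaces A's O(n^2) double loop by one prefix-XOR pass, reading each qubit's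
-- contiguous Fenwick range parity in O(1); measured asymptotically faster.

-- ===== PORT A =====
def should_include_in_parity (qubit_idx fermion_idx : Int) : Bool :=
  let i := qubit_idx + 1
  let j := fermion_idx + 1
  if j > i then false
  else
    let rightmost_bit := PySem.Int.band i (-i)
    decide ((i - rightmost_bit + 1) ≤ j ∧ j ≤ i)

def fock_to_bk (fock_vector : List Int) : List Int :=
  let n : Int := PySem.List.len fock_vector
  -- bk_vector = [0]*n with bk_vector[i] ← parity, rendered as a map over range(n)
  (PySem.List.pyRange 0 n).map (fun i =>
    (PySem.List.pyRange 0 n).foldl (fun parity j =>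
      if should_include_in_parity i j then
        PySem.Int.bxor parity (PySem.List.pyGetD fock_vector j 0)
      else parity) 0)

-- ===== PORT B =====
def fock_to_bk_alt (fock_vector : List Int) : List Int :=
  let st := fock_vector.foldl (fun (st : List Int × Int) x =>
    let acc := PySem.Int.bxor st.2 x
    (st.1 ++ [acc], acc)) ([0], 0)
  let pfx := st.1
  (PySem.List.pyRange 0 (PySem.List.len fock_vector)).map (fun i =>
    PySem.Int.bxor (PySem.List.pyGetD pfx (i + 1) 0)
      (PySem.List.pyGetD pfx ((i + 1) - PySem.Int.band (i + 1) (-(i + 1))) 0))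

-- ===== PRECONDITION & SPEC =====
def Spec_fock_to_bk (fock_vector : List Int) (out : List Int) : Prop := out = fock_to_bk_alt fock_vector
instance (fock_vector : List Int) (out : List Int) : Decidable (Spec_fock_to_bk fock_vector out) := by unfold Spec_fock_to_bk; infer_instance

-- ===== CLAIM (what is proved, stated in full; the proofs are below) =====
def Claim_equal_fock_to_bk : Prop := ∀ (fock_vector : List Int), Dom_fock_to_bk fock_vector → Spec_fock_to_bk fock_vector (fock_to_bk fock_vector)

-- ===== LEMMAS AND PROOFS =====

theorem pvBxor_eq_xor (a b : Int) : PySem.Int.bxor a b = Int.xor a b := by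
  unfold PySem.Int.bxor
  rcases a with m | m <;> rcases b with n | n <;> simp [Int.xor, Int.negSucc_eq] <;> omega

theorem pvBxor_assoc (a b c : Int) :
    PySem.Int.bxor (PySem.Int.bxor a b) c = PySem.Int.bxor a (PySem.Int.bxor b c) := by
  simp only [pvBxor_eq_xor]
  rcases a with m | m <;> rcases b with n | n <;> rcases c with k | k <;>
    simp [Int.xor, Nat.xor_assoc]

theorem pvBxor_zero_left (a : Int) : PySem.Int.bxor 0 a = a := by
  rw [PySem.Int.bxor_comm, PySem.Int.bxor_zero]

-- prefix XOR of the first k elements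
def pvPref (fv : List Int) (k : Nat) : Int := (fv.take k).foldl PySem.Int.bxor 0

theorem pvFoldl_bxor_init (l : List Int) (init : Int) :
    l.foldl PySem.Int.bxor init = PySem.Int.bxor init (l.foldl PySem.Int.bxor 0) := by
  induction l generalizing init with
  | nil => simp [PySem.Int.bxor_zero]
  | cons x t ih =>
    simp only [List.foldl_cons]
    rw [ih (PySem.Int.bxor init x), ih (PySem.Int.bxor 0 x), pvBxor_zero_left, pvBxor_assoc]

theorem pvPref_cancel (fv : List Int) (a m : Nat) (h : a ≤ m) :
    PySem.Int.bxor (pvPref fv m) (pvPref fv a)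
      = ((fv.take m).drop a).foldl PySem.Int.bxor 0 := by
  have hsplit : fv.take m = fv.take a ++ (fv.take m).drop a := by
    conv_lhs => rw [← List.take_append_drop a (fv.take m)]
    rw [List.take_take, Nat.min_eq_left h]
  have : pvPref fv m = PySem.Int.bxor (pvPref fv a) (((fv.take m).drop a).foldl PySem.Int.bxor 0) := by
    unfold pvPref
    conv_lhs => rw [hsplit]
    rw [List.foldl_append, pvFoldl_bxor_init]
  rw [this, PySem.Int.bxor_comm (pvPref fv a), pvBxor_assoc, PySem.Int.bxor_self,
    PySem.Int.bxor_zero]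

-- characterisation of B's prefix-building fold
theorem pvPrefix_fold (fv : List Int) :
    fv.foldl (fun (st : List Int × Int) x =>
        (st.1 ++ [PySem.Int.bxor st.2 x], PySem.Int.bxor st.2 x)) ([0], 0)
      = ((List.range (fv.length + 1)).map (pvPref fv), pvPref fv fv.length) := by
  induction fv using List.reverseRecOn with
  | nil => simp [pvPref]
  | append_singleton l x ih =>
    rw [List.foldl_append, ih]
    have hpref : ∀ k ≤ l.length, pvPref (l ++ [x]) k = pvPref l k := by
      intro k hk
      unfold pvPref
      rw [List.take_append, Nat.sub_eq_zero_of_le hk, List.take_zero, List.append_nil]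
    have hlast : pvPref (l ++ [x]) (l.length + 1) = PySem.Int.bxor (pvPref l l.length) x := by
      unfold pvPref
      rw [List.take_append, List.take_of_length_le (by omega),
        show l.length + 1 - l.length = 1 from by omega]
      simp [List.foldl_append, List.take_length]
    simp only [List.foldl_cons, List.foldl_nil, List.length_append,
      List.length_singleton, Prod.mk.injEq]
    refine ⟨?_, hlast.symm⟩
    rw [List.range_succ (n := l.length + 1), List.map_append]
    congr 1
    · exact (List.map_congr_left (fun k hk => (hpref k
        (Nat.lt_succ_iff.mp (List.mem_range.mp hk))).symm))
    · simp [hlast]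

theorem pvFoldl_id {α β : Type} (l : List α) (init : β) :
    l.foldl (fun acc _ => acc) init = init := by
  induction l <;> simp_all

-- a fold guarded by membership in [a, b) over a larger range collapses to the sub-range
theorem pvFoldl_guard_range (g : Int → Int → Int) (lo hi a b : Int) (init : Int)
    (h1 : lo ≤ a) (h2 : a ≤ b) (h3 : b ≤ hi) :
    (PySem.List.pyRange lo hi).foldl
        (fun acc j => if a ≤ j ∧ j < b then g acc j else acc) init
      = (PySem.List.pyRange a b).foldl g init := by
  rw [PySem.List.pyRange_one_append lo a hi h1 (le_trans h2 h3),
    PySem.List.pyRange_one_append a b hi h2 h3, List.foldl_append, List.foldl_append]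
  rw [PySem.List.foldl_congr_mem (PySem.List.pyRange lo a) _ (fun acc _ => acc) init
    (by intro acc x hx; rw [if_neg]; rcases PySem.List.mem_pyRange_one.mp hx with ⟨_, h⟩; omega),
    pvFoldl_id]
  rw [PySem.List.foldl_congr_mem (PySem.List.pyRange a b) _ g init
    (by intro acc x hx; rw [if_pos]; rcases PySem.List.mem_pyRange_one.mp hx with ⟨h, h'⟩; omega)]
  rw [PySem.List.foldl_congr_mem (PySem.List.pyRange b hi) _ (fun acc _ => acc) _
    (by intro acc x hx; rw [if_neg]; rcases PySem.List.mem_pyRange_one.mp hx with ⟨h, _⟩; omega),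
    pvFoldl_id]

theorem pvGuard_eq (qi j : Int) :
    should_include_in_parity qi j
      = decide ((qi + 1 - PySem.Int.band (qi + 1) (-(qi + 1))) ≤ j ∧ j < qi + 1) := by
  unfold should_include_in_parity
  simp only []
  split
  · rename_i h
    symm; rw [decide_eq_false_iff_not]; omega
  · rename_i h
    rw [decide_eq_decide]; omega

theorem pvBand_neg_self (m : Int) (h : 0 < m) :
    PySem.Int.band m (-m) = ((m.toNat - (m.toNat &&& (m - 1).toNat) : Nat) : Int) := by
  unfold PySem.Int.band
  rw [if_pos (by omega), if_neg (by omega)]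
  have h2 : -(-m) - 1 = m - 1 := by ring
  rw [h2]

theorem fock_to_bk_spec' (fv : List Int) : fock_to_bk fv = fock_to_bk_alt fv := by
  unfold fock_to_bk fock_to_bk_alt
  simp only [pvPrefix_fold]
  apply List.map_congr_left
  intro i hi
  rcases PySem.List.mem_pyRange_one.mp hi with ⟨hi0, hiN⟩
  simp only [PySem.List.len] at hiN ⊢
  have hband := pvBand_neg_self (i + 1) (by omega)
  have handle : ((i + 1).toNat &&& (i + 1 - 1).toNat) ≤ (i + 1).toNat := Nat.and_le_left
  have handr : ((i + 1).toNat &&& (i + 1 - 1).toNat) ≤ (i + 1 - 1).toNat := Nat.and_le_right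
  set aN : Nat := (i + 1).toNat &&& (i + 1 - 1).toNat with ha
  have haInt : i + 1 - PySem.Int.band (i + 1) (-(i + 1)) = (aN : Int) := by
    rw [hband]; omega
  have haN_le : (aN : Int) ≤ i := by omega
  -- A side: collapse the guarded full-range fold to the sub-range [aN, i+1)
  have hA : (PySem.List.pyRange 0 (fv.length : Int)).foldl (fun parity j =>
      if should_include_in_parity i j then
        PySem.Int.bxor parity (PySem.List.pyGetD fv j 0) else parity) 0
      = ((fv.take (i + 1).toNat).drop aN).foldl PySem.Int.bxor 0 := by
    rw [PySem.List.foldl_congr_mem _ _ (fun parity j =>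
        if (aN : Int) ≤ j ∧ j < i + 1 then PySem.Int.bxor parity (PySem.List.pyGetD fv j 0)
        else parity) 0
      (by
        intro acc x _
        rw [pvGuard_eq, haInt]
        simp only [decide_eq_true_eq])]
    rw [pvFoldl_guard_range _ 0 (fv.length : Int) (aN : Int) (i + 1) 0
      (by omega) (by omega) (by omega)]
    rw [PySem.List.foldl_congr_mem _ _ (fun acc j =>
        PySem.Int.bxor acc (PySem.List.pyGetD (fv.take (i + 1).toNat) j 0)) 0
      (by
        intro acc x hx
        rcases PySem.List.mem_pyRange_one.mp hx with ⟨hx0, hxm⟩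
        congr 1
        rw [PySem.List.pyGetD_of_nonneg fv 0 (by omega),
          PySem.List.pyGetD_of_nonneg (fv.take (i + 1).toNat) 0 (by omega),
          List.getD_eq_getElem?_getD, List.getD_eq_getElem?_getD,
          List.getElem?_take_of_lt (by omega)])]
    have hlen := PySem.List.foldl_pyRange_pyGetD (fv.take (i + 1).toNat) 0 PySem.Int.bxor 0
      (a := (aN : Int)) (by positivity)
    rw [PySem.List.len, show ((fv.take (i + 1).toNat).length : Int) = i + 1 by
      simp [List.length_take]; omega] at hlen
    rw [hlen]
    simp
  rw [hA]
  -- B side: read the two prefix entries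
  have hget : ∀ k : Nat, k < fv.length + 1 →
      PySem.List.pyGetD ((List.range (fv.length + 1)).map (pvPref fv)) (k : Int) 0
        = pvPref fv k := by
    intro k hk
    rw [PySem.List.pyGetD_natCast]
    rw [List.getD_eq_getElem?_getD, List.getElem?_map, List.getElem?_range hk]
    rfl
  rw [haInt, show i + 1 = (((i + 1).toNat : Nat) : Int) from by omega,
    hget (i + 1).toNat (by omega), hget aN (by omega)]
  rw [pvPref_cancel fv aN (i + 1).toNat (by omega)]
  simp only [Int.toNat_natCast]

-- ===== VERDICT (by name: the statement is the Claim_ definition above) =====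
theorem fock_to_bk_spec : Claim_equal_fock_to_bk := by
  intro fv _
  unfold Spec_fock_to_bk
  exact fock_to_bk_spec' fv
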